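-- pv_equiv track=rewrite | github.com/Henry-E/wp_neural_pipeline | modules/postprocess_e2e.py | get_name_and_near
-- ===== SOURCE A (Python) =====
-- def get_name_and_near(e2e_mr):
--     # neither might be present
--     xname = ''
--     xnear = ''
--     for act in e2e_mr:
--         act_type = act[0:act.find('[')].strip()
--         value = act[act.find('[')+1:act.find(']')]
--         if act_type == 'name':
--             xname = value
--         elif act_type == 'near':
--             xnear = value
--     return xname, xnear
-- ===== SOURCE B (Python) =====
-- def get_name_and_near(e2e_mr):
--     def last_value(key):
--         # last assignment wins = first match scanning from the end
--         for act in reversed(e2e_mr):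
--             i = act.find('[')
--             if act[0:i].strip() == key:
--                 return act[i+1:act.find(']')]
--         return ''
--     return last_value('name'), last_value('near')
-- ===== Notes on version B (the rewrite author's own statement) =====
-- stated objective: alternative
-- what changed: Instead of a forward fold over two accumulators, B scans the list back-to-front and returns the first matching value per key (early exit), exploiting that last assignment wins equals first match in reverse.
import Mathlib
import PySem

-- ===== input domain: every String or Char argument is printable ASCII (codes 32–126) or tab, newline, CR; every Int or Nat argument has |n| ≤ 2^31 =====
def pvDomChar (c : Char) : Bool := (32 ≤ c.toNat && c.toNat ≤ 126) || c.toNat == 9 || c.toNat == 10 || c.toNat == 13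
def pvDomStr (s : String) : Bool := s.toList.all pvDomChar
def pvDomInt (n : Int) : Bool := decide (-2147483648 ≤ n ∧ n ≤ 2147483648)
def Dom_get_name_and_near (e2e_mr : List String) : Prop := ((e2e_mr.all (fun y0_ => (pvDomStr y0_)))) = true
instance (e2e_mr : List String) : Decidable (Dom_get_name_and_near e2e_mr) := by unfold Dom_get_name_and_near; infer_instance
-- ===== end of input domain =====

-- B scans the list back-to-front, returning the first match per key (last assignment wins =
-- first match in reverse), instead of A's forward fold over two accumulators; objective: alternative.

-- ===== PORT A =====
-- A's loop body: parse act, then the if/elif over act_type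
def pvStepA (st : String × String) (act : String) : String × String :=
  let act_type := PySem.Str.strip (PySem.Str.slice act (some 0) (some (PySem.Str.find act "[")))
  let value := PySem.Str.slice act (some (PySem.Str.find act "[" + 1)) (some (PySem.Str.find act "]"))
  if act_type = "name" then (value, st.2)
  else if act_type = "near" then (st.1, value)
  else st

def get_name_and_near (e2e_mr : List String) : String × String :=
  e2e_mr.foldl pvStepA ("", "")

-- ===== PORT B =====
-- B's helper last_value(key): first match over the reversed list, default ''
def pvLastValue (key : String) : List String → String
  | [] => ""
  | act :: rest =>
      let i := PySem.Str.find act "["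
      if PySem.Str.strip (PySem.Str.slice act (some 0) (some i)) = key then
        PySem.Str.slice act (some (i + 1)) (some (PySem.Str.find act "]"))
      else pvLastValue key rest

def get_name_and_near_alt (e2e_mr : List String) : String × String :=
  (pvLastValue "name" e2e_mr.reverse, pvLastValue "near" e2e_mr.reverse)

-- ===== PRECONDITION & SPEC =====
def Spec_get_name_and_near (e2e_mr : List String) (out : String × String) : Prop := out = get_name_and_near_alt e2e_mr
instance (e2e_mr : List String) (out : String × String) : Decidable (Spec_get_name_and_near e2e_mr out) := by unfold Spec_get_name_and_near; infer_instance

-- ===== CLAIM =====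
def Claim_equal_get_name_and_near : Prop := ∀ (e2e_mr : List String), Dom_get_name_and_near e2e_mr → Spec_get_name_and_near e2e_mr (get_name_and_near e2e_mr)

-- ===== LEMMAS AND PROOFS =====

theorem pv_main (e2e_mr : List String) :
    e2e_mr.foldl pvStepA ("", "")
      = (pvLastValue "name" e2e_mr.reverse, pvLastValue "near" e2e_mr.reverse) := by
  induction e2e_mr using List.reverseRecOn with
  | nil => simp [pvLastValue]
  | append_singleton xs act ih =>
    rw [List.foldl_append, List.foldl_cons, List.foldl_nil, ih, List.reverse_append]
    simp only [List.reverse_singleton, List.singleton_append]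
    simp only [pvStepA, pvLastValue, PySem.Str.find]
    split_ifs <;> simp_all

-- ===== VERDICT =====
theorem get_name_and_near_spec : Claim_equal_get_name_and_near := by
  intro e2e_mr _
  unfold Spec_get_name_and_near get_name_and_near get_name_and_near_alt
  exact pv_main e2e_mr
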